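-- pv_equiv track=rewrite | github.com/pedromsilva99/tpr_library_network_perception | captures/baseProfileClass2.py | extratctSilence
-- ===== SOURCE A (Python) =====
-- def extratctSilence(data,threshold=256):
--     if(data[0]<=threshold):
--         s=[1]
--     else:
--         s=[]
--     for i in range(1,len(data)):
--         if(data[i-1]>threshold and data[i]<=threshold):
--             s.append(1)
--         elif (data[i-1]<=threshold and data[i]<=threshold):
--             s[-1]+=1
--
--     return(s)
-- ===== SOURCE B (Python) =====
-- def extratctSilence(data, threshold=256):
--     res = []
--     i, n = 0, len(data)
--     while i < n:
--         if data[i] <= threshold: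
--             j = i
--             while j < n and data[j] <= threshold:
--                 j += 1
--             res.append(j - i)
--             i = j
--         else:
--             i += 1
--     return res
-- ===== Notes on version B (the rewrite author's own statement) =====
-- stated objective: alternative
-- what changed: Replaces the edge-detecting loop over adjacent pairs (prev>t and cur<=t appends, prev<=t and cur<=t increments s[-1]) with a two-pointer run scanner that finds each maximal below-threshold run and appends its length directly, with no s[-1] accumulator and no adjacent-pair tests.
-- crash fix: On empty data A raises IndexError (it reads data[0]); B naturally returns []. — e.g. on extratctSilence([], 0): A raises IndexError, B returns []
import Mathlib
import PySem

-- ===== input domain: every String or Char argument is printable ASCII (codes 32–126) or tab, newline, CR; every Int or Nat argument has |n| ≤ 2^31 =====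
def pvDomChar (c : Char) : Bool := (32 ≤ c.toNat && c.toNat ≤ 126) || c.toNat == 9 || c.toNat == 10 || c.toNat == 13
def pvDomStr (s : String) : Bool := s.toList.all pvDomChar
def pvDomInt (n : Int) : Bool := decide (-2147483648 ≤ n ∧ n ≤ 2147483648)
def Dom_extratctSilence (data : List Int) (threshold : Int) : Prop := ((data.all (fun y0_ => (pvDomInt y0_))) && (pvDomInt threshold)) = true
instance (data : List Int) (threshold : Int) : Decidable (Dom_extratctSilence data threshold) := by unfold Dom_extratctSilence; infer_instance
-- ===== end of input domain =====

-- B replaces A's adjacent-pair edge detection (with its s[-1] accumulator) by a two-pointer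
-- maximal-run scanner of the same cost ("alternative"); A raises IndexError on empty data
-- (excluded by Pre_), where B returns [].


-- ===== PORT A =====
-- literal port of A: index loop i in range(1, len(data)); data[0] on [] raises (Pre_ excludes []);
-- 's[-1] += 1' is modelled as dropLast ++ [last + 1] (s is nonempty whenever that branch fires).
def extratctSilence (data : List Int) (threshold : Int) : List Int :=
  match data with
  | [] => []   -- A raises IndexError here; excluded by Pre_
  | d0 :: _ =>
    let s0 : List Int := if d0 ≤ threshold then [1] else []
    (PySem.List.pyRange 1 (PySem.List.len data) 1).foldl
      (fun s i =>
        if PySem.List.pyGetD data (i-1) 0 > threshold ∧ PySem.List.pyGetD data i 0 ≤ threshold then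
          s ++ [1]
        else if PySem.List.pyGetD data (i-1) 0 ≤ threshold ∧ PySem.List.pyGetD data i 0 ≤ threshold then
          s.dropLast ++ [s.getLast?.getD 0 + 1]
        else s) s0

-- ===== PORT B =====
-- inner while loop of Source B: length of the maximal leading ≤-threshold run, and the rest
def pvCountRun (threshold : Int) : List Int → Nat × List Int
  | [] => (0, [])
  | x :: xs =>
    if x ≤ threshold then
      let r := pvCountRun threshold xs
      (r.1 + 1, r.2)
    else (0, x :: xs)

-- outer while loop of Source B ('while i < n'), with the loop bound n = len(data) as structural fuel
def pvAltLoop (threshold : Int) : Nat → List Int → List Int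
  | _, [] => []
  | 0, _ :: _ => []            -- never reached: the fuel is the Python loop bound n ≥ len(rest)
  | n + 1, x :: xs =>
    if x ≤ threshold then
      let r := pvCountRun threshold (x :: xs)
      ((r.1 : Int)) :: pvAltLoop threshold n r.2
    else pvAltLoop threshold n xs

def extratctSilence_alt (data : List Int) (threshold : Int) : List Int :=
  pvAltLoop threshold data.length data

-- ===== PRECONDITION & SPEC =====
-- Pre_ excludes only the empty list, on which A raises IndexError (it reads data[0]).
def Pre_extratctSilence (data : List Int) (threshold : Int) : Prop := data ≠ []
instance (data : List Int) (threshold : Int) : Decidable (Pre_extratctSilence data threshold) := by unfold Pre_extratctSilence; infer_instance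
def pvWitness_extratctSilence : List Int × Int := ([1, 5, 2, 2, 9, 0], 3)

-- On empty data A raises IndexError (it reads data[0]); B naturally returns [].
def Raises_extratctSilence (data : List Int) (threshold : Int) : Prop := data = []
instance (data : List Int) (threshold : Int) : Decidable (Raises_extratctSilence data threshold) := by unfold Raises_extratctSilence; infer_instance
def pvRaiseWitness_extratctSilence : List Int × Int := ([], 0)
def pvRaiseWitnessOut_extratctSilence : List Int := []

def Spec_extratctSilence (data : List Int) (threshold : Int) (out : List Int) : Prop := out = extratctSilence_alt data threshold
instance (data : List Int) (threshold : Int) (out : List Int) : Decidable (Spec_extratctSilence data threshold out) := by unfold Spec_extratctSilence; infer_instance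

-- ===== CLAIM (what is proved, stated in full; the proofs are below) =====
def Claim_equal_extratctSilence : Prop := ∀ (data : List Int) (threshold : Int), Dom_extratctSilence data threshold → Pre_extratctSilence data threshold → Spec_extratctSilence data threshold (extratctSilence data threshold)
def Claim_raises_extratctSilence : Prop := (∀ (data : List Int) (threshold : Int), Dom_extratctSilence data threshold → Raises_extratctSilence data threshold → ¬ Pre_extratctSilence data threshold) ∧ (Dom_extratctSilence (pvRaiseWitness_extratctSilence.1) (pvRaiseWitness_extratctSilence.2) ∧ Raises_extratctSilence (pvRaiseWitness_extratctSilence.1) (pvRaiseWitness_extratctSilence.2) ∧ extratctSilence_alt (pvRaiseWitness_extratctSilence.1) (pvRaiseWitness_extratctSilence.2) = pvRaiseWitnessOut_extratctSilence)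

-- ===== LEMMAS AND PROOFS =====

theorem pvCountRun_length_le (threshold : Int) (xs : List Int) :
    (pvCountRun threshold xs).2.length ≤ xs.length := by
  induction xs with
  | nil => simp [pvCountRun]
  | cons x xs ih =>
    simp only [pvCountRun]
    split
    · exact Nat.le_succ_of_le ih
    · simp

-- the fuel is irrelevant as long as it covers the list
theorem pvAltLoop_fuel (t : Int) :
    ∀ (n m : Nat) (xs : List Int), xs.length ≤ n → xs.length ≤ m →
      pvAltLoop t n xs = pvAltLoop t m xs := by
  intro n
  induction n with
  | zero =>
    intro m xs hn _
    have : xs = [] := List.eq_nil_of_length_eq_zero (Nat.le_zero.mp hn)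
    subst this
    cases m <;> rfl
  | succ k ih =>
    intro m xs hn hm
    match xs, m with
    | [], m => cases m <;> rfl
    | x :: xs, m + 1 =>
      simp only [pvAltLoop]
      split
    
      · have h1 : (pvCountRun t (x :: xs)).2.length ≤ k := by
          have := pvCountRun_length_le t xs
          simp only [pvCountRun, if_pos ‹x ≤ t›] at *
          simp only [List.length_cons] at hn
          omega
        have h2 : (pvCountRun t (x :: xs)).2.length ≤ m := by
          have := pvCountRun_length_le t xs
          simp only [pvCountRun, if_pos ‹x ≤ t›] at *
          simp only [List.length_cons] at hm
          omega
        rw [ih m _ h1 h2]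
      · exact ih m xs (by simpa using Nat.lt_succ_iff.mp (Nat.lt_of_lt_of_le (Nat.lt_succ_self _) hn)) (by simp at hm; omega)

theorem alt_nil (t : Int) : extratctSilence_alt [] t = [] := rfl

theorem alt_cons (t x : Int) (xs : List Int) :
    extratctSilence_alt (x :: xs) t =
      if x ≤ t then
        ((pvCountRun t (x :: xs)).1 : Int) :: extratctSilence_alt (pvCountRun t (x :: xs)).2 t
      else extratctSilence_alt xs t := by
  show pvAltLoop t (xs.length + 1) (x :: xs) = _
  simp only [pvAltLoop]
  split
  · rw [pvAltLoop_fuel t xs.length (pvCountRun t (x :: xs)).2.length _ (by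
      have := pvCountRun_length_le t xs
      simp only [pvCountRun, if_pos ‹x ≤ t›]
      omega) (Nat.le_refl _)]
    rfl
  · rfl

-- A's loop body, as a function of the previous/current elements
def pvStep (t : Int) (s : List Int) (p c : Int) : List Int :=
  if p > t ∧ c ≤ t then s ++ [1]
  else if p ≤ t ∧ c ≤ t then s.dropLast ++ [s.getLast?.getD 0 + 1]
  else s

-- A's loop, re-expressed as a recursion carrying the previous element
def pvGo (t : Int) (p : Int) (xs : List Int) (s : List Int) : List Int :=
  match xs with
  | [] => s
  | x :: rest => pvGo t x rest (pvStep t s p x)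

theorem pvGo_spec (t : Int) (xs : List Int) :
    (∀ p s, t < p → pvGo t p xs s = s ++ extratctSilence_alt xs t) ∧
    (∀ p s (k : Int), p ≤ t →
      pvGo t p xs (s ++ [k]) =
        s ++ (k + (pvCountRun t xs).1) :: extratctSilence_alt (pvCountRun t xs).2 t) := by
  induction xs with
  | nil => exact ⟨fun p s _ => by simp [pvGo, alt_nil],
                  fun p s k _ => by simp [pvGo, pvCountRun, alt_nil]⟩
  | cons x rest ih =>
    constructor
    · intro p s hp
      by_cases hx : x ≤ t
      · have hstep : pvStep t s p x = s ++ [1] := by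
          simp [pvStep, hp, hx]
        rw [pvGo, hstep, ih.2 x s 1 hx, alt_cons]
        simp only [pvCountRun, hx, if_pos]
        push_cast
        ring_nf
      · have hstep : pvStep t s p x = s := by
          simp [pvStep, hx]
        rw [pvGo, hstep, ih.1 x s (by omega), alt_cons]
        simp [hx]
    · intro p s k hp
      by_cases hx : x ≤ t
      · have hstep : pvStep t (s ++ [k]) p x = s ++ [k + 1] := by
          simp [pvStep, hp, hx]
        rw [pvGo, hstep, ih.2 x s (k + 1) hx]
        simp only [pvCountRun, hx, if_pos]
        push_cast
        ring_nf
      · have hstep : pvStep t (s ++ [k]) p x = s ++ [k] := by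
          simp [pvStep, hp, hx]
        rw [pvGo, hstep, ih.1 x (s ++ [k]) (by omega)]
        simp only [pvCountRun, if_neg hx]
        rw [alt_cons t x rest, if_neg hx]
        simp

-- A's index loop over range(a, len) equals pvGo started at prev = data[a-1]
theorem pvIdx_to_go (t : Int) (data : List Int) :
    ∀ (n : ℕ) (a : Int) (s : List Int), 1 ≤ a → a + n = data.length →
      (PySem.List.pyRange a (PySem.List.len data) 1).foldl
        (fun s i =>
          if PySem.List.pyGetD data (i-1) 0 > t ∧ PySem.List.pyGetD data i 0 ≤ t then s ++ [1]
          else if PySem.List.pyGetD data (i-1) 0 ≤ t ∧ PySem.List.pyGetD data i 0 ≤ t then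
            s.dropLast ++ [s.getLast?.getD 0 + 1]
          else s) s
      = pvGo t (PySem.List.pyGetD data (a-1) 0) (data.drop a.toNat) s := by
  intro n
  induction n with
  | zero =>
    intro a s h1 h2
    have hnil : PySem.List.pyRange a (PySem.List.len data) 1 = [] := by
      apply PySem.List.pyRange_one_eq_nil
      simp only [PySem.List.len_eq]
      omega
    have hdrop : data.drop a.toNat = [] := by
      apply List.drop_eq_nil_of_le
      omega
    rw [hnil, hdrop]
    rfl
  | succ m ih =>
    intro a s h1 h2
    have ha : a < PySem.List.len data := by simp only [PySem.List.len_eq]; omega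
    rw [PySem.List.pyRange_one_cons ha, List.foldl_cons]
    have hlt : a.toNat < data.length := by omega
    have hget : PySem.List.pyGetD data a 0 = data[a.toNat] :=
      PySem.List.pyGetD_eq_getElem data 0 (by omega) (by exact_mod_cast by omega)
    have hdrop : data.drop a.toNat = data[a.toNat] :: data.drop (a.toNat + 1) :=
      List.drop_eq_getElem_cons hlt
    rw [ih (a + 1) _ (by omega) (by omega), hdrop]
    have he : (a + 1 - 1) = a := by ring
    rw [he, hget]
    have hn : (a + 1).toNat = a.toNat + 1 := by omega
    rw [hn]
    rfl

-- ===== VERDICT (by name: the statement is the Claim_ definition above) =====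
theorem extratctSilence_spec : Claim_equal_extratctSilence := by
  intro data t _ hpre
  unfold Spec_extratctSilence
  match data, hpre with
  | d0 :: rest, _ =>
    have hA : extratctSilence (d0 :: rest) t =
        (PySem.List.pyRange 1 (PySem.List.len (d0 :: rest)) 1).foldl
          (fun s i =>
            if PySem.List.pyGetD (d0 :: rest) (i-1) 0 > t ∧ PySem.List.pyGetD (d0 :: rest) i 0 ≤ t then
              s ++ [1]
            else if PySem.List.pyGetD (d0 :: rest) (i-1) 0 ≤ t ∧ PySem.List.pyGetD (d0 :: rest) i 0 ≤ t then
              s.dropLast ++ [s.getLast?.getD 0 + 1]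
            else s) (if d0 ≤ t then [1] else []) := rfl
    rw [hA, pvIdx_to_go t (d0 :: rest) rest.length 1 _ (by norm_num) (by simp; omega)]
    have hget0 : PySem.List.pyGetD (d0 :: rest) (1 - 1 : Int) 0 = d0 := by
      norm_num [PySem.List.pyGetD_zero_cons]
    rw [hget0]
    have hdrop : (d0 :: rest).drop (1 : Int).toNat = rest := by simp
    rw [hdrop]
    by_cases h0 : d0 ≤ t
    · rw [if_pos h0]
      have h2 := (pvGo_spec t rest).2 d0 [] 1 h0
      simp only [List.nil_append] at h2
      rw [h2, alt_cons t d0 rest, if_pos h0]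
      simp [pvCountRun, h0]
      ring_nf
    · rw [if_neg h0]
      have h1 := (pvGo_spec t rest).1 d0 [] (by omega)
      simp only [List.nil_append] at h1
      rw [h1, alt_cons t d0 rest, if_neg h0]

@[simp]
theorem extratctSilence_raises : Claim_raises_extratctSilence := by
  unfold Claim_raises_extratctSilence
  refine ⟨fun data t _ hr => ?_, by decide⟩
  simp only [Raises_extratctSilence] at hr
  simp [Pre_extratctSilence, hr]
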